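-- pv_equiv track=rewrite | github.com/fbkaragoz/ottoman-ner | scripts/fix_iob2_tags.py | fix_iob2_tags
-- ===== SOURCE A (Python) =====
-- def fix_iob2_tags(data):
--     """
--     Fix IOB2 tagging inconsistencies.
--
--     Args:
--         data: CONLL data
--
--     Returns:
--         Fixed CONLL data
--     """
--     fixed_data = []
--
--     for sentence in data:
--         fixed_sentence = []
--         prev_tag = 'O'
--         prev_entity_type = None
--
--         for token, tag in sentence:
--             if tag == 'O':
--                 fixed_sentence.append((token, tag))
--                 prev_tag = 'O'
--                 prev_entity_type = None
--             elif tag.startswith('B-'):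
--                 # B-tag is always valid
--                 entity_type = tag[2:]
--                 fixed_sentence.append((token, tag))
--                 prev_tag = 'B'
--                 prev_entity_type = entity_type
--             elif tag.startswith('I-'):
--                 entity_type = tag[2:]
--
--                 # Check if I-tag is valid
--                 if prev_tag == 'O':
--                     # I-tag after O should be B-tag
--                     fixed_tag = f'B-{entity_type}'
--                     fixed_sentence.append((token, fixed_tag))
--                     prev_tag = 'B'
--                     prev_entity_type = entity_type
--                 elif prev_entity_type != entity_type:
--                     # I-tag with different entity type should be B-tag
--                     fixed_tag = f'B-{entity_type}'
--                     fixed_sentence.append((token, fixed_tag))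
--                     prev_tag = 'B'
--                     prev_entity_type = entity_type
--                 else:
--                     # Valid I-tag
--                     fixed_sentence.append((token, tag))
--                     prev_tag = 'I'
--             else:
--                 # Unknown tag format, keep as is
--                 fixed_sentence.append((token, tag))
--                 prev_tag = 'O'
--                 prev_entity_type = None
--
--         fixed_data.append(fixed_sentence)
--
--     return fixed_data
-- ===== SOURCE B (Python) =====
-- def _fix(token, tag, prev):
--     """Fix one token given the ORIGINAL previous tag (None at sentence start)."""
--     if not tag.startswith('I-'):
--         return (token, tag)
--     etype = tag[2:]
--     if prev is not None and (prev.startswith('B-') or prev.startswith('I-')) and prev[2:] == etype: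
--         return (token, tag)
--     return (token, 'B-' + etype)
--
--
-- def fix_iob2_tags(data):
--     return [
--         [_fix(token, tag, prev)
--          for (token, tag), prev in zip(sentence, [None] + [t for _, t in sentence])]
--         for sentence in data
--     ]
-- ===== Notes on version B (the rewrite author's own statement) =====
-- stated objective: simpler
-- what changed: Replaced A's running (prev_tag, prev_entity_type) state machine with a stateless per-token pass that zips each sentence against its own shifted list of ORIGINAL tags and fixes each I-tag by looking only at its immediate predecessor's original tag.
import Mathlib
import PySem

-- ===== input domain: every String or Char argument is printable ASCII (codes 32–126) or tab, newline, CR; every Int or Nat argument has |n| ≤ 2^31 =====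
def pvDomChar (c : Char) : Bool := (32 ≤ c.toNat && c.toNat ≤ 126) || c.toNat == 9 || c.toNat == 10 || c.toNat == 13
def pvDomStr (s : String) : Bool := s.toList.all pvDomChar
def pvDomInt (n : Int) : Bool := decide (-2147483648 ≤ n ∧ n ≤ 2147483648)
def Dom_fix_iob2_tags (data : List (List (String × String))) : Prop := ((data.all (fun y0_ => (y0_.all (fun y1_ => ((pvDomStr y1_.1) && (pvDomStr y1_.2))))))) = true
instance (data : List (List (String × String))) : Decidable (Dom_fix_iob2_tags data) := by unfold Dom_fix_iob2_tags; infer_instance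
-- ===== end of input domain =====

-- B replaces A's running (prev_tag, prev_entity_type) state machine by a stateless
-- per-token pass that zips each sentence against its own shifted ORIGINAL tags (objective: simpler).

-- ===== PORT A =====
-- one step of A's inner loop; state = (fixed_sentence, prev_tag, prev_entity_type)
def fixA_token (st : List (String × String) × String × Option String) (p : String × String) :
    List (String × String) × String × Option String :=
  let fs := st.1
  let prev_tag := st.2.1
  let prev_ent := st.2.2
  let token := p.1
  let tag := p.2
  if tag = "O" then (fs ++ [(token, tag)], "O", none)
  else if PySem.Str.startswith tag "B-" then
    let entity_type := PySem.Str.slice tag (some 2) none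
    (fs ++ [(token, tag)], "B", some entity_type)
  else if PySem.Str.startswith tag "I-" then
    let entity_type := PySem.Str.slice tag (some 2) none
    if prev_tag = "O" then
      (fs ++ [(token, "B-" ++ entity_type)], "B", some entity_type)
    else if prev_ent ≠ some entity_type then
      (fs ++ [(token, "B-" ++ entity_type)], "B", some entity_type)
    else
      (fs ++ [(token, tag)], "I", prev_ent)
  else (fs ++ [(token, tag)], "O", none)

def fix_iob2_tags (data : List (List (String × String))) : List (List (String × String)) :=
  data.foldl
    (fun fixed_data sentence =>
      fixed_data ++ [(sentence.foldl fixA_token ([], "O", none)).1])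
    []

-- ===== PORT B =====
-- _fix(token, tag, prev): fix one token given the ORIGINAL previous tag (none at sentence start)
def fixB_tok (token tag : String) (prev : Option String) : String × String :=
  if ¬ (PySem.Str.startswith tag "I-" = true) then (token, tag)
  else
    let etype := PySem.Str.slice tag (some 2) none
    match prev with
    | some pv =>
        if (PySem.Str.startswith pv "B-" || PySem.Str.startswith pv "I-")
            && (PySem.Str.slice pv (some 2) none = etype) then (token, tag)
        else (token, "B-" ++ etype)
    | none => (token, "B-" ++ etype)

def fix_iob2_tags_alt (data : List (List (String × String))) : List (List (String × String)) :=
  data.map (fun sentence =>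
    (sentence.zip (none :: sentence.map (fun t => some t.2))).map
      (fun q => fixB_tok q.1.1 q.1.2 q.2))

-- ===== PRECONDITION & SPEC =====
def Spec_fix_iob2_tags (data : List (List (String × String))) (out : List (List (String × String))) : Prop := out = fix_iob2_tags_alt data
instance (data : List (List (String × String))) (out : List (List (String × String))) : Decidable (Spec_fix_iob2_tags data out) := by unfold Spec_fix_iob2_tags; infer_instance

-- ===== CLAIM (what is proved, stated in full; the proofs are below) =====
def Claim_equal_fix_iob2_tags : Prop := ∀ (data : List (List (String × String))), Dom_fix_iob2_tags data → Spec_fix_iob2_tags data (fix_iob2_tags data)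

-- ===== LEMMAS AND PROOFS =====

-- the entity type B reads off an ORIGINAL previous tag; A's invariant: prev_entity_type = ptypeOf prev
def ptypeOf (prev : Option String) : Option String :=
  match prev with
  | none => none
  | some t =>
      if PySem.Str.startswith t "B-" || PySem.Str.startswith t "I-" then
        some (PySem.Str.slice t (some 2) none)
      else none

lemma fixB_tok_of_I (token tag : String) (prev : Option String)
    (hI : PySem.Chars.startswith tag.toList ['I', '-'] = true) :
    fixB_tok token tag prev =
      if ptypeOf prev = some (PySem.Str.slice tag (some 2) none) then (token, tag)
      else (token, "B-" ++ PySem.Str.slice tag (some 2) none) := by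
  cases prev with
  | none => simp [fixB_tok, ptypeOf, hI]
  | some pv =>
      simp only [fixB_tok, ptypeOf]
      by_cases h : (PySem.Str.startswith pv "B-" || PySem.Str.startswith pv "I-") = true
      · simp [hI, h]
      · simp [hI, h]

lemma not_I_of_B (tag : String) (h : PySem.Chars.startswith tag.toList ['B', '-'] = true) :
    PySem.Chars.startswith tag.toList ['I', '-'] = false := by
  rw [show (['B', '-'] : List Char) = "B-".toList from rfl] at h
  rw [show (['I', '-'] : List Char) = "I-".toList from rfl]
  rw [PySem.Chars.startswith_iff] at h
  obtain ⟨t, ht⟩ := h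
  cases hb : (PySem.Chars.startswith tag.toList "I-".toList) with
  | false => rfl
  | true =>
      rw [PySem.Chars.startswith_iff] at hb
      obtain ⟨u, hu⟩ := hb
      rw [← ht] at hu
      simp at hu

lemma inner_eq (s : List (String × String)) (prev : Option String) (pt : String)
    (pe : Option String) (acc : List (String × String))
    (h1 : pe = ptypeOf prev) (h2 : pt = "O" → pe = none) :
    (s.foldl fixA_token (acc, pt, pe)).1
      = acc ++ (s.zip (prev :: s.map (fun t => some t.2))).map
          (fun q => fixB_tok q.1.1 q.1.2 q.2) := by
  induction s generalizing prev pt pe acc with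
  | nil => simp
  | cons hd tl ih =>
      obtain ⟨token, tag⟩ := hd
      simp only [List.foldl_cons, List.map_cons, List.zip_cons_cons, List.map]
      by_cases h0 : tag = "O"
      · subst h0
        have hstep : fixA_token (acc, pt, pe) (token, "O") = (acc ++ [(token, "O")], "O", none) := by
          simp [fixA_token]
        rw [hstep, ih (some "O") "O" none (acc ++ [(token, "O")]) (by decide) (fun _ => rfl)]
        have hb : fixB_tok token "O" prev = (token, "O") := by
          simp [fixB_tok, show PySem.Chars.startswith ['O'] ['I', '-'] = false from by decide]
        simp [hb]
      · by_cases hB : PySem.Chars.startswith tag.toList ['B', '-'] = true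
        · have hI := not_I_of_B tag hB
          have hstep : fixA_token (acc, pt, pe) (token, tag) =
              (acc ++ [(token, tag)], "B", some (PySem.Str.slice tag (some 2) none)) := by
            simp [fixA_token, h0, hB]
          rw [hstep, ih (some tag) "B" (some (PySem.Str.slice tag (some 2) none))
                (acc ++ [(token, tag)]) (by simp [ptypeOf, hB]) (by intro h; exact absurd h (by decide))]
          have hb : fixB_tok token tag prev = (token, tag) := by simp [fixB_tok, hI]
          simp [hb]
        · by_cases hI : PySem.Chars.startswith tag.toList ['I', '-'] = true
          · rw [fixB_tok_of_I token tag prev hI, ← h1]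
            by_cases hO : pt = "O"
            · have hpe : pe = none := h2 hO
              have hstep : fixA_token (acc, pt, pe) (token, tag) =
                  (acc ++ [(token, "B-" ++ PySem.Str.slice tag (some 2) none)], "B",
                    some (PySem.Str.slice tag (some 2) none)) := by
                simp [fixA_token, h0, hB, hI, hO]
              rw [hstep, ih (some tag) "B" (some (PySem.Str.slice tag (some 2) none)) _
                    (by simp [ptypeOf, hI]) (by intro h; exact absurd h (by decide))]
              simp [hpe]
            · by_cases hne : pe = some (PySem.Str.slice tag (some 2) none)
              · -- valid I-tag, kept
                have hstep : fixA_token (acc, pt, pe) (token, tag) = (acc ++ [(token, tag)], "I", pe) := by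
                  simp [fixA_token, h0, hB, hI, hO, hne]
                rw [hstep, ih (some tag) "I" pe _ (by simp [ptypeOf, hI, hne])
                      (by intro h; exact absurd h (by decide))]
                simp [hne]
              · have hstep : fixA_token (acc, pt, pe) (token, tag) =
                    (acc ++ [(token, "B-" ++ PySem.Str.slice tag (some 2) none)], "B",
                      some (PySem.Str.slice tag (some 2) none)) := by
                  simp [fixA_token, h0, hB, hI, hO, hne]
                rw [hstep, ih (some tag) "B" (some (PySem.Str.slice tag (some 2) none)) _
                      (by simp [ptypeOf, hI]) (by intro h; exact absurd h (by decide))]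
                simp [hne]
          · -- unknown tag format
            have hstep : fixA_token (acc, pt, pe) (token, tag) = (acc ++ [(token, tag)], "O", none) := by
              simp [fixA_token, h0, hB, hI]
            rw [hstep, ih (some tag) "O" none _ (by simp [ptypeOf, hB, hI]) (fun _ => rfl)]
            have hb : fixB_tok token tag prev = (token, tag) := by simp [fixB_tok, hI]
            simp [hb]

-- ===== VERDICT (by name: the statement is the Claim_ definition above) =====
theorem fix_iob2_tags_spec : Claim_equal_fix_iob2_tags := by
  intro data _
  show fix_iob2_tags data = fix_iob2_tags_alt data
  unfold fix_iob2_tags fix_iob2_tags_alt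
  rw [PySem.List.foldl_append_singleton_eq_map]
  refine List.map_congr_left (fun sentence _ => ?_)
  exact inner_eq sentence none "O" none [] rfl (fun _ => rfl)
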